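-- pv_equiv track=rewrite | github.com/openstates/people | src/ospeople/cli/lint_yaml.py | compare_districts
-- ===== SOURCE A (Python) =====
-- from collections import defaultdict, Counter
--
-- _EXPECTED_DISTRICTS_TYPE = dict[str, dict[str, int]]
--
-- _ACTUAL_DISTRICTS_TYPE = defaultdict[str, defaultdict[str, list[str]]]
--
-- def compare_districts(
--     expected: _EXPECTED_DISTRICTS_TYPE, actual: _ACTUAL_DISTRICTS_TYPE
-- ) -> list[str]:
--     errors = []
--
--     if expected.keys() != actual.keys():
--         errors.append(f"expected districts for {expected.keys()}, got {actual.keys()}")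
--         return errors
--
--     for chamber in expected:
--         expected_districts = set(expected[chamber].keys())
--         actual_districts = set(actual[chamber].keys())
--         for district in sorted(expected_districts - actual_districts):
--             if expected[chamber][district]:
--                 errors.append(f"missing legislator for {chamber} {district}")
--         for district in sorted(actual_districts - expected_districts):
--             errors.append(f"extra legislator for unexpected seat {chamber} {district}")
--         for district in sorted(actual_districts & expected_districts):
--             if len(actual[chamber][district]) < expected[chamber][district]:
--                 errors.append(f"missing legislator for {chamber} {district}")
--             if len(actual[chamber][district]) > expected[chamber][district]:
--                 people = "\n\t".join(actual[chamber][district])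
--                 errors.append(f"extra legislator for {chamber} {district}:\n\t" + people)
--     return errors
-- ===== SOURCE B (Python) =====
-- def compare_districts(expected, actual):
--     if expected.keys() != actual.keys():
--         return [f"expected districts for {expected.keys()}, got {actual.keys()}"]
--     errors = []
--     for chamber in expected:
--         exp_keys = sorted(expected[chamber])
--         act_keys = sorted(actual[chamber])
--         missing, extra_seat, common = [], [], []
--         i = j = 0
--         while i < len(exp_keys) or j < len(act_keys):
--             if j >= len(act_keys) or (i < len(exp_keys) and exp_keys[i] < act_keys[j]):
--                 d = exp_keys[i]
--                 i += 1
--                 if expected[chamber][d]: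
--                     missing.append(f"missing legislator for {chamber} {d}")
--             elif i >= len(exp_keys) or act_keys[j] < exp_keys[i]:
--                 d = act_keys[j]
--                 j += 1
--                 extra_seat.append(f"extra legislator for unexpected seat {chamber} {d}")
--             else:
--                 d = exp_keys[i]
--                 i += 1
--                 j += 1
--                 n = len(actual[chamber][d])
--                 want = expected[chamber][d]
--                 if n < want:
--                     common.append(f"missing legislator for {chamber} {d}")
--                 if n > want:
--                     people = "\n\t".join(actual[chamber][d])
--                     common.append(f"extra legislator for {chamber} {d}:\n\t" + people)
--         errors += missing + extra_seat + common
--     return errors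
-- ===== Notes on version B (the rewrite author's own statement) =====
-- stated objective: alternative
-- what changed: Per chamber, B drops all set difference/intersection operations: it sorts the two key lists once and classifies every district by a two-pointer merge walk (comparing heads decides expected-only / actual-only / common), collecting the three message categories and appending them in A's category order.
import Mathlib
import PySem

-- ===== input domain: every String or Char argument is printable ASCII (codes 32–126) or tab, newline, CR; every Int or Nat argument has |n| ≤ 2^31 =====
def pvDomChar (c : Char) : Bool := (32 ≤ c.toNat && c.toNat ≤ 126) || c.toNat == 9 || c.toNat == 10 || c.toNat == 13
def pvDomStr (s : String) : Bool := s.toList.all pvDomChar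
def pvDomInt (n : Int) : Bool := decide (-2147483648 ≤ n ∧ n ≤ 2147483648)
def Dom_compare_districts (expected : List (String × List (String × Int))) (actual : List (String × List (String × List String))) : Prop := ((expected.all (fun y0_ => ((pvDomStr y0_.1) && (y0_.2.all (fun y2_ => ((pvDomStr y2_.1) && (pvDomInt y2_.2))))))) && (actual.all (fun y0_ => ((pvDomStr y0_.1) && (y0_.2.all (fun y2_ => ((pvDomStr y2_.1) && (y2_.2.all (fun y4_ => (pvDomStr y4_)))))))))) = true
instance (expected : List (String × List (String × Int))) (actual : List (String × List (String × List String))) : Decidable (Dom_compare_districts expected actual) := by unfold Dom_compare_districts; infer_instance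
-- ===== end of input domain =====

-- B replaces A's per-chamber set difference/intersection passes by a two-pointer merge of the two
-- sorted key lists that classifies each district by head comparison (objective: alternative, same output).

-- ----- shared message helpers: the f-strings, identical in both Pythons -----
-- Python repr of a str; exact on the printable-ASCII + tab/newline/CR character set of Dom.
def pvReprChars (q : Char) (cs : List Char) : List Char :=
  cs.flatMap (fun c =>
    if c = '\\' then ['\\', '\\']
    else if c = q then ['\\', q]
    else if c = Char.ofNat 9 then ['\\', 't']
    else if c = Char.ofNat 10 then ['\\', 'n']
    else if c = Char.ofNat 13 then ['\\', 'r']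
    else [c])

def pvReprStr (s : String) : String :=
  let cs := s.toList
  let q : Char := if cs.contains '\'' && !(cs.contains '"') then '"' else '\''
  String.ofList ((q :: pvReprChars q cs) ++ [q])

-- f"{d.keys()}" = "dict_keys([<repr of each key, comma-separated>])"
def pvKeysRepr (ks : List String) : String :=
  "dict_keys([" ++ PySem.Str.join ", " (ks.map pvReprStr) ++ "])"

def pvMsgKeys (ek ak : List String) : String :=
  "expected districts for " ++ pvKeysRepr ek ++ ", got " ++ pvKeysRepr ak

def pvMsgMissing (chamber district : String) : String :=
  "missing legislator for " ++ chamber ++ " " ++ district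

def pvMsgExtraSeat (chamber district : String) : String :=
  "extra legislator for unexpected seat " ++ chamber ++ " " ++ district

def pvMsgExtra (chamber district : String) (people : List String) : String :=
  "extra legislator for " ++ chamber ++ " " ++ district ++ ":\n\t" ++ PySem.Str.join "\n\t" people

-- ===== PORT A =====
-- the body of A's 'for chamber in expected' loop: three sorted passes
-- (expected[chamber][district] / actual[chamber][district] are ported as getD: the subscripted key
-- is always present, so Python's [] never raises here)
def pvChamberA (ed : PySem.Dict String Int) (ad : PySem.Dict String (List String))
    (chamber : String) (errors : List String) : List String :=
  let expected_districts := PySem.Set.ofList ed.keys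
  let actual_districts := PySem.Set.ofList ad.keys
  let errors := (PySem.List.sorted (PySem.Set.diff expected_districts actual_districts) (fun x => x)).foldl
    (fun errors district =>
      if ed.getD district 0 ≠ 0 then errors ++ [pvMsgMissing chamber district] else errors) errors
  let errors := (PySem.List.sorted (PySem.Set.diff actual_districts expected_districts) (fun x => x)).foldl
    (fun errors district => errors ++ [pvMsgExtraSeat chamber district]) errors
  let errors := (PySem.List.sorted (PySem.Set.inter actual_districts expected_districts) (fun x => x)).foldl
    (fun errors district =>
      let errors := if ((ad.getD district []).length : Int) < ed.getD district 0
        then errors ++ [pvMsgMissing chamber district] else errors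
      if ((ad.getD district []).length : Int) > ed.getD district 0
        then errors ++ [pvMsgExtra chamber district (ad.getD district [])] else errors) errors
  errors

def compare_districts (expected : List (String × List (String × Int))) (actual : List (String × List (String × List String))) : List String :=
  let eD : PySem.Dict String (PySem.Dict String Int) :=
    PySem.Dict.ofList (expected.map (fun p => (p.1, PySem.Dict.ofList p.2)))
  let aD : PySem.Dict String (PySem.Dict String (List String)) :=
    PySem.Dict.ofList (actual.map (fun p => (p.1, PySem.Dict.ofList p.2)))
  if !(PySem.Set.equal eD.keys aD.keys) then
    [pvMsgKeys eD.keys aD.keys]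
  else
    eD.keys.foldl
      (fun errors chamber =>
        pvChamberA (eD.getD chamber PySem.Dict.empty) (aD.getD chamber PySem.Dict.empty) chamber errors)
      []

-- ===== PORT B =====
-- B's while loop: a two-pointer merge of the two sorted key lists, classifying each district by
-- comparing the current heads; ported as structural recursion on the two index suffixes
def pvMergeB (ed : PySem.Dict String Int) (ad : PySem.Dict String (List String))
    (chamber : String) : List String → List String →
    List String × List String × List String
  | [], [] => ([], [], [])
  | e :: es, [] =>
      let r := pvMergeB ed ad chamber es []
      ((if ed.getD e 0 ≠ 0 then [pvMsgMissing chamber e] else []) ++ r.1, r.2.1, r.2.2)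
  | [], a :: as =>
      let r := pvMergeB ed ad chamber [] as
      (r.1, pvMsgExtraSeat chamber a :: r.2.1, r.2.2)
  | e :: es, a :: as =>
      if e < a then
        let r := pvMergeB ed ad chamber es (a :: as)
        ((if ed.getD e 0 ≠ 0 then [pvMsgMissing chamber e] else []) ++ r.1, r.2.1, r.2.2)
      else if a < e then
        let r := pvMergeB ed ad chamber (e :: es) as
        (r.1, pvMsgExtraSeat chamber a :: r.2.1, r.2.2)
      else
        let r := pvMergeB ed ad chamber es as
        (r.1, r.2.1,
          ((if ((ad.getD e []).length : Int) < ed.getD e 0 then [pvMsgMissing chamber e] else []) ++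
           (if ((ad.getD e []).length : Int) > ed.getD e 0 then [pvMsgExtra chamber e (ad.getD e [])] else [])) ++ r.2.2)
  termination_by es as => es.length + as.length

-- the body of B's 'for chamber in expected' loop: sort both key lists, merge, append the buckets
def pvChamberB (ed : PySem.Dict String Int) (ad : PySem.Dict String (List String))
    (chamber : String) (errors : List String) : List String :=
  let exp_keys := PySem.List.sorted ed.keys (fun x => x)
  let act_keys := PySem.List.sorted ad.keys (fun x => x)
  let r := pvMergeB ed ad chamber exp_keys act_keys
  errors ++ r.1 ++ r.2.1 ++ r.2.2

def compare_districts_alt (expected : List (String × List (String × Int))) (actual : List (String × List (String × List String))) : List String :=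
  let eD : PySem.Dict String (PySem.Dict String Int) :=
    PySem.Dict.ofList (expected.map (fun p => (p.1, PySem.Dict.ofList p.2)))
  let aD : PySem.Dict String (PySem.Dict String (List String)) :=
    PySem.Dict.ofList (actual.map (fun p => (p.1, PySem.Dict.ofList p.2)))
  if !(PySem.Set.equal eD.keys aD.keys) then
    [pvMsgKeys eD.keys aD.keys]
  else
    eD.keys.foldl
      (fun errors chamber =>
        pvChamberB (eD.getD chamber PySem.Dict.empty) (aD.getD chamber PySem.Dict.empty) chamber errors)
      []

-- ===== PRECONDITION & SPEC =====
def Spec_compare_districts (expected : List (String × List (String × Int))) (actual : List (String × List (String × List String))) (out : List String) : Prop := out = compare_districts_alt expected actual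
instance (expected : List (String × List (String × Int))) (actual : List (String × List (String × List String))) (out : List String) : Decidable (Spec_compare_districts expected actual out) := by unfold Spec_compare_districts; infer_instance

-- ===== CLAIM (what is proved, stated in full; the proofs are below) =====
def Claim_equal_compare_districts : Prop := ∀ (expected : List (String × List (String × Int))) (actual : List (String × List (String × List String))), Dom_compare_districts expected actual → Spec_compare_districts expected actual (compare_districts expected actual)

-- ===== LEMMAS AND PROOFS =====

-- the per-district message lists of the three categories
def pvG1 (ed : PySem.Dict String Int) (chamber d : String) : List String :=
  if ed.getD d 0 ≠ 0 then [pvMsgMissing chamber d] else []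

def pvG2 (chamber d : String) : List String := [pvMsgExtraSeat chamber d]

def pvG3 (ed : PySem.Dict String Int) (ad : PySem.Dict String (List String))
    (chamber d : String) : List String :=
  (if ((ad.getD d []).length : Int) < ed.getD d 0 then [pvMsgMissing chamber d] else []) ++
  (if ((ad.getD d []).length : Int) > ed.getD d 0 then [pvMsgExtra chamber d (ad.getD d [])] else [])

-- merge of two strictly increasing lists = the three filtered flatMaps
theorem pvMergeB_eq (ed : PySem.Dict String Int) (ad : PySem.Dict String (List String))
    (chamber : String) (es as : List String)
    (hes : es.Pairwise (· < ·)) (has : as.Pairwise (· < ·)) :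
    pvMergeB ed ad chamber es as =
      ((es.filter (fun d => !as.contains d)).flatMap (pvG1 ed chamber),
       (as.filter (fun d => !es.contains d)).flatMap (pvG2 chamber),
       (es.filter (fun d => as.contains d)).flatMap (pvG3 ed ad chamber)) := by
  induction es, as using pvMergeB.induct ed ad chamber with
  | case1 => simp [pvMergeB]
  | case2 e es ih =>
    simp only [pvMergeB]
    rw [ih (List.Pairwise.of_cons hes) has]
    simp [pvG1]
  | case3 a as ih =>
    simp only [pvMergeB]
    rw [ih hes (List.Pairwise.of_cons has)]
    simp [pvG2]
  | case4 e es a as hlt ih =>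
    have hmem : e ∉ a :: as := by
      intro hm
      rcases List.mem_cons.mp hm with rfl | hm'
      · exact absurd hlt (lt_irrefl _)
      · exact absurd (lt_trans hlt (List.rel_of_pairwise_cons has hm')) (lt_irrefl _)
    have hb1 : (!(a :: as).contains e) = true := by
      simp only [Bool.not_eq_eq_eq_not, Bool.not_true, ← Bool.not_eq_true,
        List.contains_eq_mem, decide_eq_true_iff]; exact hmem
    have hb3 : ((a :: as).contains e) = false := by
      simp only [← Bool.not_eq_true, List.contains_eq_mem, decide_eq_true_iff]; exact hmem
    have h1 : (e :: es).filter (fun d => !(a :: as).contains d)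
        = e :: es.filter (fun d => !(a :: as).contains d) := List.filter_cons_of_pos hb1
    have h3 : (e :: es).filter (fun d => (a :: as).contains d)
        = es.filter (fun d => (a :: as).contains d) := List.filter_cons_of_neg (by rw [hb3]; exact Bool.false_ne_true)
    have h2 : (a :: as).filter (fun d => !(e :: es).contains d)
        = (a :: as).filter (fun d => !es.contains d) := by
      apply List.filter_congr
      intro d hd
      have hne : ¬ d = e := by
        rcases List.mem_cons.mp hd with rfl | hd'
        · exact fun h => absurd (h ▸ hlt) (lt_irrefl _)
        · intro h; subst h
          exact absurd (lt_trans hlt (List.rel_of_pairwise_cons has hd')) (lt_irrefl _)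
      simp [List.contains_eq_mem, hne]
    simp only [pvMergeB, if_pos hlt]
    rw [ih (List.Pairwise.of_cons hes) has, h1, h2, h3, List.flatMap_cons]
    simp [pvG1]
  | case5 e es a as hnlt hlt ih =>
    have hmem : a ∉ e :: es := by
      intro hm
      rcases List.mem_cons.mp hm with rfl | hm'
      · exact absurd hlt (lt_irrefl _)
      · exact absurd (lt_trans hlt (List.rel_of_pairwise_cons hes hm')) (lt_irrefl _)
    have hb2 : (!(e :: es).contains a) = true := by
      simp only [Bool.not_eq_eq_eq_not, Bool.not_true, ← Bool.not_eq_true,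
        List.contains_eq_mem, decide_eq_true_iff]; exact hmem
    have hea : ¬ e = a := fun h => absurd (h ▸ hlt) (lt_irrefl _)
    have hcongr : ∀ (d : String), d ∈ es → ¬ d = a := by
      intro d hd h; subst h
      exact absurd (lt_trans hlt (List.rel_of_pairwise_cons hes hd)) (lt_irrefl _)
    have h1 : (e :: es).filter (fun d => !(a :: as).contains d)
        = (e :: es).filter (fun d => !as.contains d) := by
      apply List.filter_congr
      intro d hd
      have hne : ¬ d = a := by
        rcases List.mem_cons.mp hd with rfl | hd'
        · exact hea
        · exact hcongr d hd'
      simp [List.contains_eq_mem, hne]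
    have h3 : (e :: es).filter (fun d => (a :: as).contains d)
        = (e :: es).filter (fun d => as.contains d) := by
      apply List.filter_congr
      intro d hd
      have hne : ¬ d = a := by
        rcases List.mem_cons.mp hd with rfl | hd'
        · exact hea
        · exact hcongr d hd'
      simp [List.contains_eq_mem, hne]
    have h2 : (a :: as).filter (fun d => !(e :: es).contains d)
        = a :: as.filter (fun d => !(e :: es).contains d) := List.filter_cons_of_pos hb2
    simp only [pvMergeB, if_neg hnlt, if_pos hlt]
    rw [ih hes (List.Pairwise.of_cons has), h1, h2, h3, List.flatMap_cons]
    simp [pvG2]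
  | case6 e es a as hnlt hnlt' ih =>
    have heq : e = a := le_antisymm (not_lt.mp hnlt') (not_lt.mp hnlt)
    subst heq
    have hesne : ∀ (d : String), d ∈ es → ¬ d = e := by
      intro d hd h; subst h
      exact absurd (List.rel_of_pairwise_cons hes hd) (lt_irrefl _)
    have hasne : ∀ (d : String), d ∈ as → ¬ d = e := by
      intro d hd h; subst h
      exact absurd (List.rel_of_pairwise_cons has hd) (lt_irrefl _)
    have h1 : (e :: es).filter (fun d => !(e :: as).contains d)
        = es.filter (fun d => !as.contains d) := by
      rw [List.filter_cons_of_neg (by simp [List.contains_eq_mem])]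
      apply List.filter_congr
      intro d hd
      simp [List.contains_eq_mem, hesne d hd]
    have h2 : (e :: as).filter (fun d => !(e :: es).contains d)
        = as.filter (fun d => !es.contains d) := by
      rw [List.filter_cons_of_neg (by simp [List.contains_eq_mem])]
      apply List.filter_congr
      intro d hd
      simp [List.contains_eq_mem, hasne d hd]
    have h3 : (e :: es).filter (fun d => (e :: as).contains d)
        = e :: es.filter (fun d => as.contains d) := by
      rw [List.filter_cons_of_pos (by simp [List.contains_eq_mem])]
      congr 1
      apply List.filter_congr
      intro d hd
      simp [List.contains_eq_mem, hesne d hd]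
    simp only [pvMergeB, if_neg hnlt]
    rw [ih (List.Pairwise.of_cons hes) (List.Pairwise.of_cons has), h1, h2, h3, List.flatMap_cons]
    simp [pvG3]

theorem pvSorted_pairwise_lt (xs : List String) (h : xs.Nodup) :
    (PySem.List.sorted xs (fun x => x)).Pairwise (· < ·) := by
  have hle := PySem.List.sorted_pairwise xs (fun x => x)
  have hnd : (PySem.List.sorted xs (fun x => x)).Nodup :=
    (PySem.List.sorted_perm xs (fun x => x) false).nodup_iff.mpr h
  exact (hle.and hnd).imp (fun hab => lt_of_le_of_ne hab.1 hab.2)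

-- sorted of a set with the stated membership is the matching filter of a sorted base list
theorem pvSorted_eq_filter (xs U : List String) (p : String → Bool)
    (hx : xs.Nodup) (hU : U.Pairwise (· < ·)) (hUnd : U.Nodup)
    (hmem : ∀ d, d ∈ xs ↔ d ∈ U ∧ p d = true) :
    PySem.List.sorted xs (fun x => x) = U.filter p := by
  apply PySem.List.sorted_eq_of_perm_of_pairwise_lt
  · exact (List.perm_ext_iff_of_nodup (hUnd.filter p) hx).mpr
      (fun d => by simp [List.mem_filter, hmem d, and_comm])
  · exact hU.filter p

theorem pvChamber_eq (ed : PySem.Dict String Int) (ad : PySem.Dict String (List String))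
    (chamber : String) (errors : List String)
    (hednd : ed.keys.Nodup) (hadnd : ad.keys.Nodup) :
    pvChamberA ed ad chamber errors = pvChamberB ed ad chamber errors := by
  unfold pvChamberA pvChamberB
  dsimp only
  set E := PySem.List.sorted ed.keys (fun x => x) with hE
  set A := PySem.List.sorted ad.keys (fun x => x) with hA
  have hEnd : E.Nodup := (PySem.List.sorted_perm _ _ false).nodup_iff.mpr hednd
  have hAnd : A.Nodup := (PySem.List.sorted_perm _ _ false).nodup_iff.mpr hadnd
  have hElt : E.Pairwise (· < ·) := pvSorted_pairwise_lt _ hednd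
  have hAlt : A.Pairwise (· < ·) := pvSorted_pairwise_lt _ hadnd
  have hmemE : ∀ d, d ∈ E ↔ d ∈ ed.keys := fun d => PySem.List.mem_sorted _ _ _ d
  have hmemA : ∀ d, d ∈ A ↔ d ∈ ad.keys := fun d => PySem.List.mem_sorted _ _ _ d
  have hcE : ∀ d, E.contains d = true ↔ d ∈ ed.keys := by
    intro d; rw [List.contains_eq_mem, decide_eq_true_iff]; exact hmemE d
  have hcA : ∀ d, A.contains d = true ↔ d ∈ ad.keys := by
    intro d; rw [List.contains_eq_mem, decide_eq_true_iff]; exact hmemA d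
  -- A's three sorted passes are the three filters of the sorted key lists
  have h1 : PySem.List.sorted (PySem.Set.diff (PySem.Set.ofList ed.keys) (PySem.Set.ofList ad.keys)) (fun x => x)
      = E.filter (fun d => !A.contains d) := by
    apply pvSorted_eq_filter _ _ _
      (PySem.Set.nodup_diff _ _ (PySem.Set.nodup_ofList ed.keys)) hElt hEnd
    intro d
    simp [PySem.Set.mem_diff, PySem.Set.mem_ofList, List.contains_eq_mem, hmemE, hmemA]
  have h2 : PySem.List.sorted (PySem.Set.diff (PySem.Set.ofList ad.keys) (PySem.Set.ofList ed.keys)) (fun x => x)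
      = A.filter (fun d => !E.contains d) := by
    apply pvSorted_eq_filter _ _ _
      (PySem.Set.nodup_diff _ _ (PySem.Set.nodup_ofList ad.keys)) hAlt hAnd
    intro d
    simp [PySem.Set.mem_diff, PySem.Set.mem_ofList, List.contains_eq_mem, hmemE, hmemA]
  have h3 : PySem.List.sorted (PySem.Set.inter (PySem.Set.ofList ad.keys) (PySem.Set.ofList ed.keys)) (fun x => x)
      = E.filter (fun d => A.contains d) := by
    apply pvSorted_eq_filter _ _ _
      (PySem.Set.nodup_inter _ _ (PySem.Set.nodup_ofList ad.keys)) hElt hEnd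
    intro d
    simp only [PySem.Set.mem_inter, PySem.Set.mem_ofList, List.contains_eq_mem, hmemE, hmemA,
      decide_eq_true_iff]
    tauto
  rw [h1, h2, h3]
  -- A's three loops, as flatMaps of the per-district message lists
  have loop1 : ∀ (init : List String),
      (E.filter (fun d => !A.contains d)).foldl
        (fun errors district =>
          if ed.getD district 0 ≠ 0 then errors ++ [pvMsgMissing chamber district] else errors) init
      = init ++ (E.filter (fun d => !A.contains d)).flatMap (pvG1 ed chamber) := by
    intro init
    rw [List.foldl_ext _ (fun errors district => errors ++ pvG1 ed chamber district) init
        (fun acc b _ => by unfold pvG1; split <;> simp_all)]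
    exact PySem.List.foldl_append_eq_flatMap _ _ _
  have loop2 : ∀ (init : List String),
      (A.filter (fun d => !E.contains d)).foldl
        (fun errors district => errors ++ [pvMsgExtraSeat chamber district]) init
      = init ++ (A.filter (fun d => !E.contains d)).flatMap (pvG2 chamber) := by
    intro init; exact PySem.List.foldl_append_eq_flatMap _ _ _
  have loop3 : ∀ (init : List String),
      (E.filter (fun d => A.contains d)).foldl
        (fun errors district =>
          let errors := if ((ad.getD district []).length : Int) < ed.getD district 0
            then errors ++ [pvMsgMissing chamber district] else errors
          if ((ad.getD district []).length : Int) > ed.getD district 0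
            then errors ++ [pvMsgExtra chamber district (ad.getD district [])] else errors) init
      = init ++ (E.filter (fun d => A.contains d)).flatMap (pvG3 ed ad chamber) := by
    intro init
    rw [List.foldl_ext _ (fun errors district => errors ++ pvG3 ed ad chamber district) init
        (fun acc b _ => by unfold pvG3; dsimp only; split_ifs <;> simp)]
    exact PySem.List.foldl_append_eq_flatMap _ _ _
  rw [loop1, loop2, loop3, pvMergeB_eq ed ad chamber E A hElt hAlt]

theorem pvMem_values_foldl {κ ν : Type} [BEq κ] [LawfulBEq κ] (pairs : List (κ × ν)) (d : PySem.Dict κ ν)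
    (v : ν) (h : v ∈ (pairs.foldl (fun d p => d.insert p.1 p.2) d).values) :
    v ∈ d.values ∨ v ∈ pairs.map Prod.snd := by
  induction pairs generalizing d with
  | nil => exact Or.inl h
  | cons p ps ih =>
    rcases ih (d.insert p.1 p.2) h with h' | h'
    · rcases PySem.Dict.mem_values_insert _ _ _ _ h' with rfl | h''
      · exact Or.inr (by simp)
      · exact Or.inl h''
    · exact Or.inr (by simp [h'])

-- every chamber dict looked up in the outer loops has Nodup keys
theorem pvNodup_getD {ν : Type} (l : List (String × List (String × ν))) (c : String) :
    ((PySem.Dict.ofList (l.map (fun p => (p.1, PySem.Dict.ofList p.2)))).getD c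
      PySem.Dict.empty).keys.Nodup := by
  set d := PySem.Dict.ofList (l.map (fun p => (p.1, PySem.Dict.ofList p.2))) with hd
  have hnd : d.keys.Nodup := PySem.Dict.nodup_keys_ofList _
  rw [PySem.Dict.getD_eq_get?_getD]
  cases h : d.get? c with
  | none => exact PySem.Dict.nodup_keys_empty
  | some v =>
    have hitem : (c, v) ∈ d.items := PySem.Dict.mem_items_of_get?_eq_some _ h
    have hv : v ∈ d.values := by
      simp only [PySem.Dict.values]
      exact List.mem_map.mpr ⟨(c, v), hitem, rfl⟩
    have := pvMem_values_foldl (l.map (fun p => (p.1, PySem.Dict.ofList p.2))) PySem.Dict.empty v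
      (by exact hv)
    rcases this with h' | h'
    · simp [PySem.Dict.empty, PySem.Dict.values] at h'
    · rcases List.mem_map.mp h' with ⟨q, hq, rfl⟩
      rcases List.mem_map.mp hq with ⟨p, hp, rfl⟩
      exact PySem.Dict.nodup_keys_ofList _

-- ===== VERDICT (by name: the statement is the Claim_ definition above) =====
theorem compare_districts_spec : Claim_equal_compare_districts := by
  intro expected actual _
  unfold Spec_compare_districts compare_districts compare_districts_alt
  dsimp only
  split
  · rfl
  · apply List.foldl_ext
    intro acc chamber _
    exact pvChamber_eq _ _ chamber acc (pvNodup_getD expected chamber) (pvNodup_getD actual chamber)
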